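-- pv_equiv track=rewrite | github.com/Altanis/foobar | running_with_bunnies.py | solution
-- ===== SOURCE A (Python) =====
-- import itertools
--
-- def convert_to_path(perm):
--     perm = list(perm)
--     perm = [0] + perm + [-1]
--     path = list()
--     for i in range(1, len(perm)):
--         path.append((perm[i - 1], perm[i]))
--     return path
--
-- def solution(times, time_limit):
--     rows = len(times)
--     bunnies = rows - 2
--
--     # Floyd-Warshall algorithm to find the shortest paths between all pairs of vertices
--     for k in range(rows):
--         for i in range(rows):
--             for j in range(rows):
--                 if times[i][j] > times[i][k] + times[k][j]:
--                     times[i][j] = times[i][k] + times[k][j]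
--
--     # Check if a negative cycle exists
--     for r in range(rows):
--         if times[r][r] < 0:
--             return [i for i in range(bunnies)]
--
--     # Find the best combination of bunnies to pick up within the time limit
--     for i in reversed(range(bunnies + 1)):
--         for perm in itertools.permutations(range(1, bunnies + 1), i):
--             total_time = 0
--             path = convert_to_path(perm)
--             for start, end in path:
--                 total_time += times[start][end]
--             if total_time <= time_limit:
--                 return sorted(list(i - 1 for i in perm))
--
--     return None
-- ===== SOURCE B (Python) =====
-- def solution(times, time_limit):
--     rows = len(times)
--     bunnies = rows - 2
--     dist = [list(row) for row in times]
--     # all-pairs shortest paths (same preprocessing, on a copy: the input is not mutated)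
--     for k in range(rows):
--         for i in range(rows):
--             for j in range(rows):
--                 if dist[i][j] > dist[i][k] + dist[k][j]:
--                     dist[i][j] = dist[i][k] + dist[k][j]
--     if any(dist[r][r] < 0 for r in range(rows)):
--         return list(range(bunnies))
--
--     memo = {}
--
--     def minc(v, rem, m):
--         # minimal cost of a path v -> (m distinct bunnies taken from rem) -> exit; None if m > len(rem)
--         if m == 0:
--             return dist[v][-1]
--         key = (v, rem, m)
--         if key not in memo:
--             best = None
--             for u in rem:
--                 c = minc(u, tuple(x for x in rem if x != u), m - 1)
--                 if c is not None:
--                     c = c + dist[v][u]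
--                     if best is None or c < best:
--                         best = c
--             memo[key] = best
--         return memo[key]
--
--     def build(v, t, rem, m):
--         # lexicographically first order of m bunnies from rem feasible within the limit; None if none
--         if m == 0:
--             return [] if t + dist[v][-1] <= time_limit else None
--         for u in rem:
--             rest = tuple(x for x in rem if x != u)
--             c = minc(u, rest, m - 1)
--             if c is not None and t + dist[v][u] + c <= time_limit:
--                 tail = build(u, t + dist[v][u], rest, m - 1)
--                 return None if tail is None else [u] + tail
--         return None
--
--     cand = tuple(range(1, bunnies + 1))
--     for i in range(bunnies, -1, -1):
--         p = build(0, 0, cand, i)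
--         if p is not None:
--             return sorted(x - 1 for x in p)
--     return None
-- ===== Notes on version B (the rewrite author's own statement) =====
-- stated objective: alternative
-- what changed: A tries every itertools permutation of every subset size in order; B keeps the Floyd-Warshall preprocessing but replaces the permutation scan with a memoized minimal-completion-cost oracle over (vertex, remaining-set, count) states plus a greedy construction of the lexicographically first feasible ordering, which reproduces A's first-hit answer exactly.
import Mathlib
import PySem

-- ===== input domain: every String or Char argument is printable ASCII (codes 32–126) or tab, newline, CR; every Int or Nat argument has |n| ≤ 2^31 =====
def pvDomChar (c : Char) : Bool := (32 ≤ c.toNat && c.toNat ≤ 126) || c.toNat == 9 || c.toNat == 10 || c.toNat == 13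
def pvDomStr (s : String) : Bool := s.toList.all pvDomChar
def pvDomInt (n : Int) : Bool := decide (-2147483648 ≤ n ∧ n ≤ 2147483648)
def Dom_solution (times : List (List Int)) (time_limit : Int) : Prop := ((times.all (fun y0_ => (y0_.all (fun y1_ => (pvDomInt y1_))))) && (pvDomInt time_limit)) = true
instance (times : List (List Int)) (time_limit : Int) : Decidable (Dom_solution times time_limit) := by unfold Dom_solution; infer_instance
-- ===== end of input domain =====

-- B replaces A's factorial scan over itertools.permutations by a memoized min-cost
-- completion oracle plus a greedy lexicographic construction (alternative algorithm;
-- A mutates `times` in place via Floyd-Warshall, B works on a copy — the equivalence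
-- proved here is about the return value only).

-- shared matrix-indexing primitive: times[i][j] / dist[i][j] (Python negative indexing;
-- exact wherever the Python indexing succeeds — Pre_ excludes the IndexError inputs)
def pvMGet (m : List (List Int)) (i j : Int) : Int :=
  (PySem.List.pyGet? ((PySem.List.pyGet? m i).getD []) j).getD 0

-- shared: times[i][j] = v
def pvMSet (m : List (List Int)) (i j : Int) (v : Int) : List (List Int) :=
  PySem.List.pySetD m i (PySem.List.pySetD ((PySem.List.pyGet? m i).getD []) j v)

-- ===== PORT A =====

-- the in-place Floyd-Warshall triple loop of A
def pvFloydA (ts : List (List Int)) : List (List Int) :=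
  (List.range ts.length).foldl (fun m k =>
    (List.range ts.length).foldl (fun m i =>
      (List.range ts.length).foldl (fun m j =>
        if pvMGet m i j > pvMGet m i k + pvMGet m k j then
          pvMSet m i j (pvMGet m i k + pvMGet m k j)
        else m) m) m) ts

-- the pair loop of convert_to_path: consecutive pairs of [0] + perm + [-1]
def pvPairs : List Int → List (Int × Int)
  | a :: b :: rest => (a, b) :: pvPairs (b :: rest)
  | _ => []

def pvConvertToPath (perm : List Int) : List (Int × Int) :=
  pvPairs (0 :: perm ++ [-1])

-- A's total_time accumulation loop
def pvTotalA (m : List (List Int)) (perm : List Int) : Int :=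
  (pvConvertToPath perm).foldl (fun acc se => acc + pvMGet m se.1 se.2) 0

-- A's outer loop: i = bunnies, bunnies-1, …, 0; first permutation within the limit wins
def pvSearchA (m : List (List Int)) (lim : Int) (cand : List Int) : Nat → Option (List Int)
  | 0 =>
    match (PySem.List.permutations cand 0).find? (fun p => decide (pvTotalA m p ≤ lim)) with
    | some p => some (PySem.List.sorted (p.map (fun x => x - 1)) (fun x => x) false)
    | none => none
  | i + 1 =>
    match (PySem.List.permutations cand (i + 1)).find? (fun p => decide (pvTotalA m p ≤ lim)) with
    | some p => some (PySem.List.sorted (p.map (fun x => x - 1)) (fun x => x) false)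
    | none => pvSearchA m lim cand i

def solution (times : List (List Int)) (time_limit : Int) : Option (List Int) :=
  let rows : Int := (times.length : Int)
  let bunnies : Int := rows - 2
  let m := pvFloydA times
  if (List.range times.length).any (fun r => decide (pvMGet m r r < 0)) then
    some (PySem.List.pyRange 0 bunnies 1)
  else if 0 ≤ bunnies then
    pvSearchA m time_limit (PySem.List.pyRange 1 (bunnies + 1) 1) bunnies.toNat
  else none

-- ===== PORT B =====

-- Source B's Floyd-Warshall loop (identical preprocessing, run on the copied matrix)
def pvFloydB (ts : List (List Int)) : List (List Int) :=
  (List.range ts.length).foldl (fun m k =>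
    (List.range ts.length).foldl (fun m i =>
      (List.range ts.length).foldl (fun m j =>
        if pvMGet m i j > pvMGet m i k + pvMGet m k j then
          pvMSet m i j (pvMGet m i k + pvMGet m k j)
        else m) m) m) ts

-- Source B's minc: minimal cost of a path v -> (m distinct bunnies from rem) -> exit
-- (Source B memoizes this recursion in a dict; the memo table only caches values, so the
-- plain recursion computes the same function)
def pvMinC (d : List (List Int)) : Int → List Int → Nat → Option Int
  | v, _, 0 => some (pvMGet d v (-1))
  | v, rem, m + 1 =>
    rem.foldl (fun best u =>
      match pvMinC d u (rem.filter (fun x => x ≠ u)) m with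
      | none => best
      | some c =>
        let c := c + pvMGet d v u
        match best with
        | none => some c
        | some b => if c < b then some c else some b) none

-- Source B's build: lexicographically first feasible order of m bunnies from rem
def pvBuild (d : List (List Int)) (lim : Int) : Int → Int → List Int → Nat → Option (List Int)
  | v, t, _, 0 => if t + pvMGet d v (-1) ≤ lim then some [] else none
  | v, t, rem, m + 1 =>
    match rem.find? (fun u =>
      match pvMinC d u (rem.filter (fun x => x ≠ u)) m with
      | none => false
      | some c => decide (t + pvMGet d v u + c ≤ lim)) with
    | some u =>
      (pvBuild d lim u (t + pvMGet d v u) (rem.filter (fun x => x ≠ u)) m).map (fun tail => u :: tail)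
    | none => none

-- Source B's outer loop: i = bunnies, …, 0; greedy construction at the first feasible size
def pvSearchB (d : List (List Int)) (lim : Int) (cand : List Int) : Nat → Option (List Int)
  | 0 =>
    match pvBuild d lim 0 0 cand 0 with
    | some p => some (PySem.List.sorted (p.map (fun x => x - 1)) (fun x => x) false)
    | none => none
  | i + 1 =>
    match pvBuild d lim 0 0 cand (i + 1) with
    | some p => some (PySem.List.sorted (p.map (fun x => x - 1)) (fun x => x) false)
    | none => pvSearchB d lim cand i

def solution_alt (times : List (List Int)) (time_limit : Int) : Option (List Int) :=
  let rows : Int := (times.length : Int)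
  let bunnies : Int := rows - 2
  let d := pvFloydB (times.map (fun row => row))
  if (List.range times.length).any (fun r => decide (pvMGet d r r < 0)) then
    some (PySem.List.pyRange 0 bunnies 1)
  else if 0 ≤ bunnies then
    pvSearchB d time_limit (PySem.List.pyRange 1 (bunnies + 1) 1) bunnies.toNat
  else none

-- ===== PRECONDITION & SPEC =====
-- Pre_ excludes exactly the inputs where Python A raises IndexError: a matrix with some
-- row shorter than the number of rows (Floyd-Warshall reads times[i][j] for all i, j < rows).
def Pre_solution (times : List (List Int)) (time_limit : Int) : Prop :=
  ∀ row ∈ times, times.length ≤ row.length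
instance (times : List (List Int)) (time_limit : Int) : Decidable (Pre_solution times time_limit) := by
  unfold Pre_solution; infer_instance

def pvWitness_solution : List (List Int) × Int := ([[0, 1, 1], [1, 0, 1], [1, 1, 0]], 3)

def Spec_solution (times : List (List Int)) (time_limit : Int) (out : Option (List Int)) : Prop := out = solution_alt times time_limit
instance (times : List (List Int)) (time_limit : Int) (out : Option (List Int)) : Decidable (Spec_solution times time_limit out) := by unfold Spec_solution; infer_instance

-- ===== CLAIM (what is proved, stated in full; the proofs are below) =====
def Claim_equal_solution : Prop := ∀ (times : List (List Int)) (time_limit : Int), Dom_solution times time_limit → Pre_solution times time_limit → Spec_solution times time_limit (solution times time_limit)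

-- ===== LEMMAS AND PROOFS =====

-- the path cost A's fold and B's recursions both compute: v -> (perm) -> exit column -1
def pvCost (d : List (List Int)) : Int → List Int → Int
  | v, [] => pvMGet d v (-1)
  | v, u :: p => pvMGet d v u + pvCost d u p

theorem pvPairs_foldl (m : List (List Int)) :
    ∀ (p : List Int) (v acc : Int),
      (pvPairs (v :: p ++ [-1])).foldl (fun acc se => acc + pvMGet m se.1 se.2) acc
        = acc + pvCost m v p := by
  intro p
  induction p with
  | nil => intro v acc; simp [pvPairs, pvCost]
  | cons u p ih =>
    intro v acc
    simp only [List.cons_append, pvPairs, List.foldl_cons, pvCost]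
    exact (ih u (acc + pvMGet m v u)).trans (by ring)

theorem pvTotalA_eq (m : List (List Int)) (p : List Int) :
    pvTotalA m p = pvCost m 0 p := by
  simpa [pvTotalA, pvConvertToPath] using pvPairs_foldl m p 0 0

-- index-based flatMap over a Nodup list = value-based flatMap with filter-removal
theorem pvIdxFlat {β : Type} :
    ∀ (l : List Int) (f : Int → List Int → List β), l.Nodup →
      (List.range l.length).flatMap
        (fun i => match l[i]? with
          | none => []
          | some x => f x (l.eraseIdx i))
      = l.flatMap (fun x => f x (l.filter (fun y => y ≠ x))) := by
  intro l
  induction l with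
  | nil => intro f _; simp
  | cons a t ih =>
    intro f h
    have hmem : a ∉ t := (List.nodup_cons.mp h).1
    have ht : t.Nodup := (List.nodup_cons.mp h).2
    rw [List.length_cons, List.range_succ_eq_map, List.flatMap_cons, List.flatMap_map]
    simp only [List.getElem?_cons_zero, List.eraseIdx_cons_zero, Nat.succ_eq_add_one,
      List.getElem?_cons_succ, List.eraseIdx_cons_succ]
    rw [ih (fun x r => f x (a :: r)) ht, List.flatMap_cons]
    congr 1
    · have h1 : (a :: t).filter (fun y => decide (y ≠ a)) = t := by
        rw [List.filter_cons]
        simp only [decide_not, ne_eq, not_true_eq_false, decide_false, Bool.not_false,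
          Bool.false_eq_true, if_neg, decide_true, Bool.not_true]
        exact List.filter_eq_self.mpr (fun y hy => by
          simp only [decide_eq_true_eq, ne_eq, decide_not, Bool.not_eq_true',
            decide_eq_false_iff_not]
          rintro rfl; exact hmem hy)
      rw [h1]
    · apply List.flatMap_congr
      intro x hx
      have hax : a ≠ x := fun e => hmem (e ▸ hx)
      have h2 : (a :: t).filter (fun y => decide (y ≠ x)) = a :: t.filter (fun y => decide (y ≠ x)) := by
        rw [List.filter_cons, if_pos (by simpa using hax)]
      rw [h2]

-- permutations of a Nodup list, selection form
theorem pvPermSelect (xs : List Int) (m : Nat) (h : xs.Nodup) :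
    PySem.List.permutations xs (m + 1)
      = xs.flatMap (fun x =>
          (PySem.List.permutations (xs.filter (fun y => y ≠ x)) m).map (fun p => x :: p)) := by
  have h0 : PySem.List.permutations xs (m + 1)
      = (List.range xs.length).flatMap
          (fun i => match xs[i]? with
            | none => []
            | some x => (PySem.List.permutations (xs.eraseIdx i) m).map (fun p => x :: p)) := by
    simp only [PySem.List.permutations]
    exact List.flatMap_congr (fun i _ => by cases xs[i]? <;> rfl)
  rw [h0, pvIdxFlat xs (fun x r => (PySem.List.permutations r m).map (fun p => x :: p)) h]

-- (∃ c, some X = some c ∧ P c) unpacked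
theorem pvExSome (X : Int) (P : Int → Prop) :
    (∃ c, (some X : Option Int) = some c ∧ P c) ↔ P X := by
  constructor
  · rintro ⟨c, hc, hp⟩; injection hc with e; exact e ▸ hp
  · intro hp; exact ⟨X, rfl, hp⟩

-- running minimum over a list, option-valued: when is the result within a bound
theorem pvFoldMin (g : Int → Option Int) (T L : Int) :
    ∀ (us : List Int) (best : Option Int),
      (∃ c, us.foldl (fun b u =>
          match g u with
          | none => b
          | some c =>
            match b with
            | none => some c
            | some bb => if c < bb then some c else some bb) best = some c ∧ T + c ≤ L)
      ↔ (∃ c, best = some c ∧ T + c ≤ L) ∨ ∃ u ∈ us, ∃ c, g u = some c ∧ T + c ≤ L := by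
  intro us
  induction us with
  | nil => intro best; simp
  | cons u us ih =>
    intro best
    rw [List.foldl_cons, ih]
    have hmem : (∃ u' ∈ u :: us, ∃ c, g u' = some c ∧ T + c ≤ L)
        ↔ ((∃ c, g u = some c ∧ T + c ≤ L) ∨ ∃ u' ∈ us, ∃ c, g u' = some c ∧ T + c ≤ L) := by
      constructor
      · rintro ⟨u', hu', hc⟩
        rcases List.mem_cons.mp hu' with rfl | hu'
        · exact Or.inl hc
        · exact Or.inr ⟨u', hu', hc⟩
      · rintro (hc | ⟨u', hu', hc⟩)
        · exact ⟨u, List.mem_cons_self, hc⟩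
        · exact ⟨u', List.mem_cons_of_mem u hu', hc⟩
    rw [hmem]
    have e0 : (∃ c', (none : Option Int) = some c' ∧ T + c' ≤ L) ↔ False := by simp
    cases hg : g u with
    | none =>
      simp only [hg]
      rw [e0, false_or]
    | some c =>
      have e1 : (∃ c', (some c : Option Int) = some c' ∧ T + c' ≤ L) ↔ T + c ≤ L :=
        pvExSome c (fun c' => T + c' ≤ L)
      cases hb : best with
      | none =>
        simp only [hg, hb]
        rw [e0, e1, false_or]
      | some bb =>
        have e2 : (∃ c', (some bb : Option Int) = some c' ∧ T + c' ≤ L) ↔ T + bb ≤ L :=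
          pvExSome bb (fun c' => T + c' ≤ L)
        simp only [hg, hb]
        split_ifs with hlt
        · rw [e1, e2]
          constructor
          · rintro (hc | hr)
            · exact Or.inr (Or.inl hc)
            · exact Or.inr (Or.inr hr)
          · rintro (hbb | hc | hr)
            · exact Or.inl (by omega)
            · exact Or.inl hc
            · exact Or.inr hr
        · rw [e1, e2]
          constructor
          · rintro (hbb | hr)
            · exact Or.inl hbb
            · exact Or.inr (Or.inr hr)
          · rintro (hbb | hc | hr)
            · exact Or.inl hbb
            · exact Or.inl (by omega)
            · exact Or.inr hr

-- minc is exact: its value is ≤-reachable iff some permutation is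
theorem pvMinC_exact (d : List (List Int)) :
    ∀ (m : Nat) (v : Int) (rem : List Int) (T L : Int), rem.Nodup →
      ((∃ c, pvMinC d v rem m = some c ∧ T + c ≤ L)
        ↔ ∃ p ∈ PySem.List.permutations rem m, T + pvCost d v p ≤ L) := by
  intro m
  induction m with
  | zero =>
    intro v rem T L _
    simp [pvMinC, PySem.List.permutations, pvCost]
  | succ m ih =>
    intro v rem T L h
    have hstep : pvMinC d v rem (m + 1)
        = rem.foldl (fun b u =>
            match (pvMinC d u (rem.filter (fun x => x ≠ u)) m).map
                (fun c => c + pvMGet d v u) with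
            | none => b
            | some c =>
              match b with
              | none => some c
              | some bb => if c < bb then some c else some bb) none := by
      show rem.foldl _ none = _
      apply PySem.List.foldl_congr_mem
      intro b u _
      cases pvMinC d u (rem.filter (fun x => x ≠ u)) m <;> simp
    rw [hstep,
      pvFoldMin (fun u => (pvMinC d u (rem.filter (fun x => x ≠ u)) m).map
        (fun c => c + pvMGet d v u)) T L rem none]
    simp only [reduceCtorEq, false_and, exists_false, false_or]
    rw [pvPermSelect rem m h]
    simp only [List.mem_flatMap, List.mem_map]
    constructor
    · rintro ⟨u, hu, c, hc, hle⟩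
      rw [Option.map_eq_some_iff] at hc
      obtain ⟨c0, hc0, rfl⟩ := hc
      have := (ih u (rem.filter (fun x => x ≠ u)) (T + pvMGet d v u) L
        (h.filter _)).mp ⟨c0, hc0, by omega⟩
      obtain ⟨p, hp, hple⟩ := this
      exact ⟨u :: p, ⟨u, hu, p, hp, rfl⟩, by simp only [pvCost]; omega⟩
    · rintro ⟨q, ⟨u, hu, p, hp, rfl⟩, hle⟩
      simp only [pvCost] at hle
      have := (ih u (rem.filter (fun x => x ≠ u)) (T + pvMGet d v u) L
        (h.filter _)).mpr ⟨p, hp, by omega⟩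
      obtain ⟨c0, hc0, hc0le⟩ := this
      exact ⟨u, hu, c0 + pvMGet d v u, by rw [hc0]; rfl, by omega⟩

-- first-hit over a flatMap: the outer find? of the per-block tests picks the block
-- whose first hit is the global first hit
theorem pvFindOr {α β : Type} :
    ∀ (us : List α) (cond : α → Bool) (g : α → Option β) (f : α → List β) (p : β → Bool),
      (∀ u ∈ us, cond u = (List.find? p (f u)).isSome) →
      (∀ u ∈ us, g u = List.find? p (f u)) →
      (us.find? cond).bind g = List.find? p (us.flatMap f) := by
  intro us
  induction us with
  | nil => intro cond g f p _ _; simp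
  | cons a t ih =>
    intro cond g f p h1 h2
    rw [List.flatMap_cons, List.find?_append]
    cases ha : cond a with
    | true =>
      rw [List.find?_cons_of_pos ha, Option.bind_some]
      have hsome : (List.find? p (f a)).isSome = true := by
        rw [← h1 a List.mem_cons_self]; exact ha
      rw [Option.or_of_isSome hsome]
      show g a = _
      exact h2 a List.mem_cons_self
    | false =>
      rw [List.find?_cons_of_neg (by simp [ha])]
      have hnone : List.find? p (f a) = none := by
        rw [← Option.not_isSome_iff_eq_none, ← h1 a List.mem_cons_self, ha]; simp
      rw [hnone, Option.none_or]
      exact ih cond g f p (fun u hu => h1 u (List.mem_cons_of_mem a hu))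
        (fun u hu => h2 u (List.mem_cons_of_mem a hu))

-- build = first feasible permutation, in itertools order
theorem pvBuild_eq_find (d : List (List Int)) (lim : Int) :
    ∀ (m : Nat) (v t : Int) (rem : List Int), rem.Nodup →
      pvBuild d lim v t rem m
        = (PySem.List.permutations rem m).find?
            (fun p => decide (t + pvCost d v p ≤ lim)) := by
  intro m
  induction m with
  | zero =>
    intro v t rem _
    simp only [pvBuild, PySem.List.permutations, List.find?_cons, pvCost]
    by_cases hle : t + pvMGet d v (-1) ≤ lim
    · simp [hle]
    · simp [hle]
  | succ m ih =>
    intro v t rem h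
    have hpred : ∀ u : Int, ((fun p => decide (t + pvCost d v p ≤ lim)) ∘ (fun p => u :: p))
        = fun p => decide ((t + pvMGet d v u) + pvCost d u p ≤ lim) := by
      intro u
      funext p
      simp only [Function.comp_apply, pvCost]
      exact decide_eq_decide.mpr (by omega)
    have H1 : ∀ u ∈ rem,
        (match pvMinC d u (rem.filter (fun x => x ≠ u)) m with
          | none => false
          | some c => decide (t + pvMGet d v u + c ≤ lim))
        = (List.find? (fun p => decide (t + pvCost d v p ≤ lim))
            ((PySem.List.permutations (rem.filter (fun y => y ≠ u)) m).map
              (fun p => u :: p))).isSome := by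
      intro u _
      rw [List.find?_map, hpred u, Option.isSome_map]
      cases hval : pvMinC d u (rem.filter (fun x => x ≠ u)) m with
      | none =>
        show false = _
        have hn : List.find? (fun p => decide (t + pvMGet d v u + pvCost d u p ≤ lim))
            (PySem.List.permutations (rem.filter (fun y => y ≠ u)) m) = none := by
          rw [List.find?_eq_none]
          intro p hp
          simp only [decide_eq_true_eq]
          intro hple
          obtain ⟨c, hc, -⟩ := (pvMinC_exact d m u (rem.filter (fun x => x ≠ u))
            (t + pvMGet d v u) lim (h.filter _)).mpr ⟨p, hp, hple⟩
          rw [hval] at hc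
          exact absurd hc (by simp)
        rw [hn]
        rfl
      | some c =>
        show decide (t + pvMGet d v u + c ≤ lim) = _
        by_cases hc : t + pvMGet d v u + c ≤ lim
        · rw [decide_eq_true hc]
          obtain ⟨p, hp, hple⟩ := (pvMinC_exact d m u (rem.filter (fun x => x ≠ u))
            (t + pvMGet d v u) lim (h.filter _)).mp ⟨c, hval, by omega⟩
          symm
          rw [List.find?_isSome]
          exact ⟨p, hp, decide_eq_true hple⟩
        · rw [decide_eq_false hc]
          have hn : List.find? (fun p => decide (t + pvMGet d v u + pvCost d u p ≤ lim))
              (PySem.List.permutations (rem.filter (fun y => y ≠ u)) m) = none := by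
            rw [List.find?_eq_none]
            intro p hp
            simp only [decide_eq_true_eq]
            intro hple
            obtain ⟨c', hc', hc'le⟩ := (pvMinC_exact d m u (rem.filter (fun x => x ≠ u))
              (t + pvMGet d v u) lim (h.filter _)).mpr ⟨p, hp, hple⟩
            rw [hval] at hc'
            injection hc' with e
            omega
          rw [hn]
          rfl
    have H2 : ∀ u ∈ rem,
        (pvBuild d lim u (t + pvMGet d v u) (rem.filter (fun x => x ≠ u)) m).map
          (fun tail => u :: tail)
        = List.find? (fun p => decide (t + pvCost d v p ≤ lim))
            ((PySem.List.permutations (rem.filter (fun y => y ≠ u)) m).map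
              (fun p => u :: p)) := by
      intro u _
      rw [List.find?_map, hpred u,
        ← ih u (t + pvMGet d v u) (rem.filter (fun x => x ≠ u)) (h.filter _)]
    rw [pvPermSelect rem m h, ← pvFindOr rem
      (fun u => match pvMinC d u (rem.filter (fun x => x ≠ u)) m with
        | none => false
        | some c => decide (t + pvMGet d v u + c ≤ lim))
      (fun u => (pvBuild d lim u (t + pvMGet d v u) (rem.filter (fun x => x ≠ u)) m).map
        (fun tail => u :: tail))
      (fun u => (PySem.List.permutations (rem.filter (fun y => y ≠ u)) m).map
        (fun p => u :: p))
      (fun p => decide (t + pvCost d v p ≤ lim)) H1 H2]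
    cases hf : rem.find? (fun u => match pvMinC d u (rem.filter (fun x => x ≠ u)) m with
        | none => false
        | some c => decide (t + pvMGet d v u + c ≤ lim)) with
    | none =>
      rw [pvBuild, hf]
      rfl
    | some u =>
      rw [pvBuild, hf]
      rfl

theorem pvSearch_eq (d : List (List Int)) (lim : Int) (cand : List Int) (h : cand.Nodup) :
    ∀ i : Nat, pvSearchA d lim cand i = pvSearchB d lim cand i := by
  have hpred : (fun p => decide (pvTotalA d p ≤ lim))
      = fun p => decide ((0 : Int) + pvCost d 0 p ≤ lim) := by
    funext p
    exact decide_eq_decide.mpr (by rw [pvTotalA_eq]; omega)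
  intro i
  induction i with
  | zero =>
    simp only [pvSearchA, pvSearchB, pvBuild_eq_find d lim 0 0 0 cand h, hpred]
  | succ i ih =>
    simp only [pvSearchA, pvSearchB, pvBuild_eq_find d lim (i + 1) 0 0 cand h, hpred, ih]

-- ===== VERDICT (by name: the statement is the Claim_ definition above) =====
theorem solution_spec : Claim_equal_solution := by
  intro times time_limit _dom _pre
  unfold Spec_solution solution solution_alt
  have hcopy : times.map (fun row => row) = times := by simp
  have hf : pvFloydB = pvFloydA := rfl
  rw [hcopy, hf]
  simp only []
  split
  · rfl
  · split
    · exact pvSearch_eq (pvFloydA times) time_limit _ (PySem.List.nodup_pyRange_one _ _) _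
    · rfl
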